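-- pv_equiv track=rewrite | github.com/CvanderStoep/adventofcode2016 | day20.py | find_allowed_ip
-- ===== SOURCE A (Python) =====
-- def find_allowed_ip(lines: list) -> int:
--     begin_interval, end_interval = lines[0]
--     total_allowed_ip = 0
--     max_ip = 2**32 - 1
--     for index, (b, e) in enumerate(lines):
--         if b - 1 <= end_interval:
--             end_interval = max(end_interval, e)
--         else:
--             lowest_ip = end_interval + 1
--             valid_range = b - lowest_ip
--             total_allowed_ip += valid_range
--             end_interval = max(end_interval, e)
--
--     return total_allowed_ip + max_ip - end_interval
-- ===== SOURCE B (Python) =====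
-- def prefix_maxes(m, ends):
--     # pm[i] = max(m, ends[:i]); length len(ends) + 1
--     if not ends:
--         return [m]
--     return [m] + prefix_maxes(max(m, ends[0]), ends[1:])
--
--
-- def find_allowed_ip(lines: list) -> int:
--     pm = prefix_maxes(lines[0][1], [e for _, e in lines])
--     gaps = [max(0, b - m - 1) for (b, _), m in zip(lines, pm)]
--     return sum(gaps) + 2**32 - 1 - pm[-1]
-- ===== Notes on version B (the rewrite author's own statement) =====
-- stated objective: alternative
-- what changed: Replaces A's stateful branching merge loop with a two-pass decomposition: precompute the list of running prefix maxima of interval ends, then sum branch-free clamped gaps max(0, b - m - 1) against it; Pre_ excludes only the empty list, where A raises IndexError (B raises there too).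
import Mathlib
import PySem

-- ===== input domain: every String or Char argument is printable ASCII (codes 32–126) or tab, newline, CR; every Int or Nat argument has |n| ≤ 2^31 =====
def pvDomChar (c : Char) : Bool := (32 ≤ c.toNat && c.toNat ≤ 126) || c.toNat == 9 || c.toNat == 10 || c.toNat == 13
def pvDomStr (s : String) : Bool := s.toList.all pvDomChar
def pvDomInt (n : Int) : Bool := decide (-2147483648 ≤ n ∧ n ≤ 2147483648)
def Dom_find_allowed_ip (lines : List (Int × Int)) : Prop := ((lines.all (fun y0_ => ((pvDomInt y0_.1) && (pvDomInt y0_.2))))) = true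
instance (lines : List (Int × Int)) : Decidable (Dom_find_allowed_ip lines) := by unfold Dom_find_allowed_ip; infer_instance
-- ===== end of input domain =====

-- B replaces A's branching merge loop by a prefix-maxima pass plus a branch-free sum of clamped gaps max(0, b - m - 1); same O(n) cost (alternative decomposition).


-- ===== PORT A =====
-- literal transliteration of Source A: state (end_interval, total_allowed_ip), branch order kept
def find_allowed_ip (lines : List (Int × Int)) : Int :=
  match lines with
  | [] => 0  -- lines[0] raises IndexError in Python; excluded by Pre_
  | (_, e0) :: _ =>
    let st := lines.foldl (fun (st : Int × Int) (be : Int × Int) =>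
      let endI := st.1
      let tot := st.2
      let b := be.1
      let e := be.2
      if b - 1 ≤ endI then (max endI e, tot)
      else (max endI e, tot + (b - (endI + 1)))) (e0, 0)
    st.2 + (2 ^ 32 - 1) - st.1

-- ===== PORT B =====
-- Source B helper: pm[i] = max(m, ends[:i]); built by a loop appending the running max
def prefixMaxes (m : Int) (ends : List Int) : List Int :=
  (ends.foldl (fun (st : Int × List Int) (e : Int) =>
      let m' := max st.1 e
      (m', st.2 ++ [m'])) (m, [m])).2

def find_allowed_ip_alt (lines : List (Int × Int)) : Int :=
  match lines with
  | [] => 0  -- lines[0] raises IndexError in Python; excluded by Pre_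
  | (_, e0) :: _ =>
    let pm := prefixMaxes e0 (lines.map Prod.snd)
    let gaps := (lines.zip pm).map (fun p => max 0 (p.1.1 - p.2 - 1))
    gaps.sum + (2 ^ 32 - 1) - (pm.getLast?.getD 0)

-- ===== PRECONDITION & SPEC =====
-- Pre_ excludes exactly the empty list, on which A (and B) raise IndexError at lines[0].
def Pre_find_allowed_ip (lines : List (Int × Int)) : Prop := lines ≠ []
instance (lines : List (Int × Int)) : Decidable (Pre_find_allowed_ip lines) := by unfold Pre_find_allowed_ip; infer_instance
def pvWitness_find_allowed_ip : (List (Int × Int)) := [((5 : Int), (10 : Int))]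

def Spec_find_allowed_ip (lines : List (Int × Int)) (out : Int) : Prop := out = find_allowed_ip_alt lines
instance (lines : List (Int × Int)) (out : Int) : Decidable (Spec_find_allowed_ip lines out) := by unfold Spec_find_allowed_ip; infer_instance

-- ===== CLAIM (what is proved, stated in full; the proofs are below) =====
def Claim_equal_find_allowed_ip : Prop := ∀ (lines : List (Int × Int)), Dom_find_allowed_ip lines → Pre_find_allowed_ip lines → Spec_find_allowed_ip lines (find_allowed_ip lines)

-- ===== LEMMAS AND PROOFS =====

-- recursive characterisation of prefixMaxes, used only by the proofs
def pmRec (m : Int) : List Int → List Int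
  | [] => [m]
  | e :: rest => m :: pmRec (max m e) rest

lemma pmRec_cons_head (m : Int) (xs : List Int) : ∃ t, pmRec m xs = m :: t := by
  cases xs <;> simp [pmRec]

lemma prefixMaxes_fold (xs : List Int) (m : Int) (acc : Int × List Int) :
    xs.foldl (fun (st : Int × List Int) (e : Int) =>
      let m' := max st.1 e
      (m', st.2 ++ [m'])) acc =
    ((xs.foldl max acc.1), acc.2 ++ (pmRec acc.1 xs).tail) := by
  induction xs generalizing acc with
  | nil => simp [pmRec]
  | cons e rest ih =>
    simp only [List.foldl_cons, pmRec]
    rw [ih]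
    obtain ⟨t, ht⟩ := pmRec_cons_head (max acc.1 e) rest
    simp [ht]

lemma prefixMaxes_eq (m : Int) (xs : List Int) : prefixMaxes m xs = pmRec m xs := by
  unfold prefixMaxes
  rw [prefixMaxes_fold xs m (m, [m])]
  obtain ⟨t, ht⟩ := pmRec_cons_head m xs
  simp [ht]

lemma getLast_pmRec_cons (m m' : Int) (xs : List Int) :
    (m :: pmRec m' xs).getLast?.getD 0 = (pmRec m' xs).getLast?.getD 0 := by
  obtain ⟨t, ht⟩ := pmRec_cons_head m' xs
  simp [ht]

-- A's loop invariant: the state after folding xs from (m, t) is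
-- (last prefix max, t + sum of clamped gaps against pmRec m)
lemma loopA_eq (xs : List (Int × Int)) (m t : Int) :
    xs.foldl (fun (st : Int × Int) (be : Int × Int) =>
      let endI := st.1
      let tot := st.2
      let b := be.1
      let e := be.2
      if b - 1 ≤ endI then (max endI e, tot)
      else (max endI e, tot + (b - (endI + 1)))) (m, t) =
    ((pmRec m (xs.map Prod.snd)).getLast?.getD 0,
     t + ((xs.zip (pmRec m (xs.map Prod.snd))).map (fun p => max 0 (p.1.1 - p.2 - 1))).sum) := by
  induction xs generalizing m t with
  | nil => simp [pmRec]
  | cons be rest ih =>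
    obtain ⟨b, e⟩ := be
    simp only [List.foldl_cons, List.map_cons, pmRec, List.zip_cons_cons, List.map,
      List.sum_cons]
    rw [getLast_pmRec_cons]
    by_cases h : b - 1 ≤ m
    · have hg : max (0 : Int) (b - m - 1) = 0 := by omega
      simp only [if_pos h, ih, hg]
      ring_nf
    · have hg : max (0 : Int) (b - m - 1) = b - m - 1 := by omega
      simp only [if_neg h, ih, hg]
      congr 1
      ring

-- ===== VERDICT (by name: the statement is the Claim_ definition above) =====
theorem find_allowed_ip_spec : Claim_equal_find_allowed_ip := by
  intro lines _ hpre
  unfold Spec_find_allowed_ip find_allowed_ip find_allowed_ip_alt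
  match lines with
  | [] => exact absurd rfl hpre
  | (b0, e0) :: rest =>
    simp only [prefixMaxes_eq, loopA_eq]
    ring
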